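-- pv_equiv track=rewrite | github.com/Ricardo2-Silva/pkmn_eternity | lote_12/ro.py | _mergeOrderings
-- ===== SOURCE A (Python) =====
-- def _mergeOrderings(orderings):
--     """Merge multiple orderings so that within-ordering order is preserved
--
--     Orderings are constrained in such a way that if an object appears
--     in two or more orderings, then the suffix that begins with the
--     object must be in both orderings.
--
--     For example:
--
--     >>> _mergeOrderings([
--     ... ['x', 'y', 'z'],
--     ... ['q', 'z'],
--     ... [1, 3, 5],
--     ... ['z']
--     ... ])
--     ['x', 'y', 'q', 1, 3, 5, 'z']
--
--     """
--     seen = {}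
--     result = []
--     for ordering in reversed(orderings):
--         for o in reversed(ordering):
--             if o not in seen:
--                 seen[o] = 1
--                 result.insert(0, o)
--
--     return result
-- ===== SOURCE B (Python) =====
-- def _mergeOrderings(orderings):
--     flat = []
--     for ordering in orderings:
--         flat.extend(ordering)
--     last = {}
--     for i, o in enumerate(flat):
--         last[o] = i
--     return [o for i, o in enumerate(flat) if last[o] == i]
-- ===== Notes on version B (the rewrite author's own statement) =====
-- stated objective: faster
-- what changed: Instead of a reverse scan that front-inserts into the result (each insert(0,...) shifting the whole list), B flattens all orderings once, records each element's last-occurrence index in one dict pass, and emits elements whose position equals their last occurrence in a single forward pass.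
import Mathlib
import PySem

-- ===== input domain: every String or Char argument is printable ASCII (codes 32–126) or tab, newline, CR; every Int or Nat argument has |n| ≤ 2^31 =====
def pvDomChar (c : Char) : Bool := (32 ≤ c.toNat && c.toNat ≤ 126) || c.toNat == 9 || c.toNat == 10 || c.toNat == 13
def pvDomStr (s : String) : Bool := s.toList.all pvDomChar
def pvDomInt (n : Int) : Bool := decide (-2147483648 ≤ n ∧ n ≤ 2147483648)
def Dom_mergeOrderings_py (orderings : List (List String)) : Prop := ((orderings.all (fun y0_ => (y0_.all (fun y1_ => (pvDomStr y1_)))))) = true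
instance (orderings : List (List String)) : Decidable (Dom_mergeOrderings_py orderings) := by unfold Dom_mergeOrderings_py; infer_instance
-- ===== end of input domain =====

-- B replaces A's reverse scan with front-insertion by one flattening pass, a last-occurrence
-- index dict, and one forward filtering pass (objective: faster, avoids repeated insert(0, ...)).

-- ===== PORT A =====
def mergeOrderings_py (orderings : List (List String)) : List String :=
  (orderings.reverse.foldl
    (fun (st : PySem.Dict String Int × List String) ordering =>
      ordering.reverse.foldl
        (fun st o => if st.1.contains o then st else (st.1.insert o 1, o :: st.2))
        st)
    (PySem.Dict.empty, [])).2

-- ===== PORT B =====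
def mergeOrderings_py_alt (orderings : List (List String)) : List String :=
  let flat := orderings.foldl (fun acc ordering => acc ++ ordering) []
  let last : PySem.Dict String Int :=
    (PySem.List.enumerate flat).foldl (fun d p => d.insert p.2 p.1) PySem.Dict.empty
  ((PySem.List.enumerate flat).filter (fun p => last.get? p.2 == some p.1)).map (·.2)

-- ===== PRECONDITION & SPEC =====
def Spec_mergeOrderings_py (orderings : List (List String)) (out : List String) : Prop := out = mergeOrderings_py_alt orderings
instance (orderings : List (List String)) (out : List String) : Decidable (Spec_mergeOrderings_py orderings out) := by unfold Spec_mergeOrderings_py; infer_instance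

-- ===== CLAIM (what is proved, stated in full; the proofs are below) =====
def Claim_equal_mergeOrderings_py : Prop := ∀ (orderings : List (List String)), Dom_mergeOrderings_py orderings → Spec_mergeOrderings_py orderings (mergeOrderings_py orderings)

-- ===== LEMMAS AND PROOFS =====

-- A's inner loop step
def pvStepA (st : PySem.Dict String Int × List String) (o : String) :
    PySem.Dict String Int × List String :=
  if st.1.contains o then st else (st.1.insert o 1, o :: st.2)

-- first-occurrence dedup relative to an already-seen list s
def pvDedupNot (s : List String) : List String → List String
  | [] => []
  | o :: t => if o ∈ s then pvDedupNot s t else o :: pvDedupNot (o :: s) t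

-- keep an element iff it is not in s and has no later occurrence
def pvDll (s : List String) : List String → List String
  | [] => []
  | x :: t => if x ∈ s ∨ x ∈ t then pvDll s t else x :: pvDll s t

-- index of the last occurrence
def pvLastIdx : List String → String → Option Nat
  | [], _ => none
  | x :: t, o =>
    match pvLastIdx t o with
    | some k => some (k + 1)
    | none => if x = o then some 0 else none

theorem pvLastIdx_eq_none_iff (l : List String) (o : String) :
    pvLastIdx l o = none ↔ o ∉ l := by
  induction l with
  | nil => simp [pvLastIdx]
  | cons x t ih =>
    cases h : pvLastIdx t o with
    | some k =>
      have hmem : o ∈ t := by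
        by_contra hc
        simp [ih.mpr hc] at h
      simp [pvLastIdx, h, hmem]
    | none =>
      have ht : o ∉ t := ih.mp h
      by_cases hx : x = o
      · simp [pvLastIdx, h, hx]
      · have hox : ¬ o = x := fun he => hx he.symm
        simp [pvLastIdx, h, hx, ht, hox]

theorem pvLoopA (r : List String) :
    ∀ (d : PySem.Dict String Int) (acc : List String) (s : List String),
      (∀ o, d.contains o = decide (o ∈ s)) →
      (r.foldl pvStepA (d, acc)).2 = (pvDedupNot s r).reverse ++ acc := by
  induction r with
  | nil => intro d acc s _; simp [pvDedupNot]
  | cons o t ih =>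
    intro d acc s hinv
    by_cases hm : o ∈ s
    · have hstep : pvStepA (d, acc) o = (d, acc) := by simp [pvStepA, hinv o, hm]
      rw [List.foldl_cons, hstep, ih d acc s hinv, pvDedupNot, if_pos hm]
    · have hstep : pvStepA (d, acc) o = (d.insert o 1, o :: acc) := by
        simp [pvStepA, hinv o, hm]
      have hinv' : ∀ x, (d.insert o 1).contains x = decide (x ∈ o :: s) := by
        intro x
        rw [PySem.Dict.contains_insert, hinv x]
        by_cases hx : x = o
        · simp [hx]
        · simp [List.mem_cons, hx]
      rw [List.foldl_cons, hstep, ih (d.insert o 1) (o :: acc) (o :: s) hinv',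
        pvDedupNot, if_neg hm]
      simp

theorem pvDedupNot_snoc (r : List String) :
    ∀ (s : List String) (x : String),
      pvDedupNot s (r ++ [x]) = pvDedupNot s r ++ (if x ∈ s ∨ x ∈ r then [] else [x]) := by
  induction r with
  | nil => intro s x; by_cases h : x ∈ s <;> simp [pvDedupNot, h]
  | cons o t ih =>
    intro s x
    simp only [List.cons_append, pvDedupNot]
    by_cases ho : o ∈ s
    · rw [if_pos ho, if_pos ho, ih]
      have hiff : (x ∈ s ∨ x ∈ t) ↔ (x ∈ s ∨ x ∈ o :: t) := by
        simp only [List.mem_cons]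
        constructor
        · tauto
        · rintro (h | h | h)
          · tauto
          · subst h; tauto
          · tauto
      by_cases hc : x ∈ s ∨ x ∈ t
      · rw [if_pos hc, if_pos (hiff.mp hc)]
      · rw [if_neg hc, if_neg (fun h' => hc (hiff.mpr h'))]
    · rw [if_neg ho, if_neg ho, ih]
      have hiff : (x ∈ o :: s ∨ x ∈ t) ↔ (x ∈ s ∨ x ∈ o :: t) := by
        simp only [List.mem_cons]; tauto
      by_cases hc : x ∈ o :: s ∨ x ∈ t
      · rw [if_pos hc, if_pos (hiff.mp hc)]; simp
      · rw [if_neg hc, if_neg (fun h' => hc (hiff.mpr h'))]; simp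

theorem pvDedupNot_reverse (l : List String) :
    ∀ s, (pvDedupNot s l.reverse).reverse = pvDll s l := by
  induction l with
  | nil => intro s; simp [pvDedupNot, pvDll]
  | cons x t ih =>
    intro s
    simp only [List.reverse_cons, pvDedupNot_snoc, pvDll]
    rw [List.reverse_append, ih]
    by_cases h : x ∈ s ∨ x ∈ t
    · have h' : (x ∈ s ∨ x ∈ t.reverse) := by simpa using h
      simp [h]
    · have h' : ¬ (x ∈ s ∨ x ∈ t.reverse) := by simpa using h
      simp [h]

theorem pvGetLastDict (l : List String) :
    ∀ (s : Int) (d : PySem.Dict String Int) (o : String),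
      ((PySem.List.enumerate l s).foldl (fun d p => d.insert p.2 p.1) d).get? o
        = match pvLastIdx l o with
          | some k => some (s + (k : Int))
          | none => d.get? o := by
  induction l with
  | nil => intro s d o; simp [pvLastIdx, PySem.List.enumerate_nil]
  | cons x t ih =>
    intro s d o
    rw [PySem.List.enumerate_cons, List.foldl_cons, ih]
    simp only [pvLastIdx]
    cases h : pvLastIdx t o with
    | some k =>
      simp only []
      congr 1
      push_cast
      ring
    | none =>
      simp only []
      rw [PySem.Dict.get?_insert]
      by_cases hx : o = x
      · simp [hx]
      · rw [if_neg (fun h' : x = o => hx h'.symm), if_neg hx]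

theorem pvLastIdx_eq_iff (l : List String) :
    ∀ (k : Nat) (hk : k < l.length),
      (pvLastIdx l l[k] = some k) ↔ l[k] ∉ l.drop (k + 1) := by
  induction l with
  | nil => intro k hk; simp at hk
  | cons x t ih =>
    intro k hk
    cases k with
    | zero =>
      simp only [List.getElem_cons_zero, List.drop_succ_cons, List.drop_zero, pvLastIdx]
      cases h : pvLastIdx t x with
      | some m =>
        have hx : x ∈ t := by
          by_contra hc
          exact absurd ((pvLastIdx_eq_none_iff t x).mpr hc) (by simp [h])
        simp [hx]
      | none =>
        have hx : x ∉ t := (pvLastIdx_eq_none_iff t x).mp h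
        simp [hx]
    | succ j =>
      have hj : j < t.length := by simpa using hk
      simp only [List.getElem_cons_succ, List.drop_succ_cons, pvLastIdx]
      have hmem : t[j] ∈ t := List.getElem_mem hj
      cases h : pvLastIdx t t[j] with
      | none => exact absurd ((pvLastIdx_eq_none_iff t t[j]).mp h) (by simp [hmem])
      | some m =>
        have hih := ih j hj
        rw [h] at hih
        simp only [Option.some.injEq] at hih ⊢
        rw [show (m + 1 = j + 1) ↔ (m = j) by omega]
        exact hih

theorem pvFilterDll (l : List String) :
    ∀ (s : Int) (P : Int × String → Bool),
      (∀ (k : Nat) (hk : k < l.length), P (s + (k : Int), l[k]) = !decide (l[k] ∈ l.drop (k + 1))) →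
      ((PySem.List.enumerate l s).filter P).map (·.2) = pvDll [] l := by
  induction l with
  | nil => intro s P _; simp [PySem.List.enumerate_nil, pvDll]
  | cons x t ih =>
    intro s P hP
    have h0 := hP 0 (by simp)
    simp only [Nat.cast_zero, add_zero, List.getElem_cons_zero, List.drop_succ_cons,
      List.drop_zero] at h0
    have hshift : ∀ (k : Nat) (hk : k < t.length),
        P (s + 1 + (k : Int), t[k]) = !decide (t[k] ∈ t.drop (k + 1)) := by
      intro k hk
      have := hP (k + 1) (by simp [Nat.succ_lt_succ hk])
      simpa [add_assoc, add_comm, add_left_comm] using this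
    rw [PySem.List.enumerate_cons, List.filter_cons]
    by_cases hx : x ∈ t
    · have : P (s, x) = false := by simp [h0, hx]
      simp only [this, Bool.false_eq_true, if_false, pvDll]
      rw [if_pos (Or.inr hx)]
      exact ih (s + 1) P hshift
    · have : P (s, x) = true := by simp [h0, hx]
      simp only [this, if_true, List.map_cons, pvDll]
      rw [if_neg (by simp [hx])]
      rw [ih (s + 1) P hshift]

theorem mergeOrderings_py_eq_dll (orderings : List (List String)) :
    mergeOrderings_py orderings = pvDll [] orderings.flatten := by
  have hA : mergeOrderings_py orderings
      = (orderings.flatten.reverse.foldl pvStepA (PySem.Dict.empty, [])).2 := by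
    unfold mergeOrderings_py
    rw [List.reverse_flatten, List.foldl_flatten, ← List.map_reverse, List.foldl_map]
    rfl
  rw [hA, pvLoopA orderings.flatten.reverse PySem.Dict.empty [] []
    (fun o => by simp [PySem.Dict.contains_empty])]
  rw [List.append_nil, pvDedupNot_reverse]

theorem mergeOrderings_py_alt_eq_dll (orderings : List (List String)) :
    mergeOrderings_py_alt orderings = pvDll [] orderings.flatten := by
  unfold mergeOrderings_py_alt
  have hflat : orderings.foldl (fun acc ordering => acc ++ ordering) [] = orderings.flatten := by
    simp [PySem.List.foldl_append_eq_flatten (xs := orderings) (acc := ([] : List String))]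
  simp only [hflat]
  apply pvFilterDll
  intro k hk
  rw [pvGetLastDict]
  have hmem : orderings.flatten[k] ∈ orderings.flatten := List.getElem_mem hk
  cases h : pvLastIdx orderings.flatten orderings.flatten[k] with
  | none => exact absurd ((pvLastIdx_eq_none_iff _ _).mp h) (by simp [hmem])
  | some m =>
    have hih := pvLastIdx_eq_iff orderings.flatten k hk
    rw [h] at hih
    simp only [Option.some.injEq] at hih
    by_cases hd : orderings.flatten[k] ∈ orderings.flatten.drop (k + 1)
    · have hm : m ≠ k := fun he => (hih.mp he) hd
      simp [hd, hm]
    · have hm : m = k := hih.mpr hd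
      simp [hd, hm]

-- ===== VERDICT (by name: the statement is the Claim_ definition above) =====
theorem mergeOrderings_py_spec : Claim_equal_mergeOrderings_py := by
  intro orderings _
  unfold Spec_mergeOrderings_py
  rw [mergeOrderings_py_eq_dll, mergeOrderings_py_alt_eq_dll]
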